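-- pv_equiv track=rewrite | github.com/bigmlcom/python | bigml/util.py | bigml_locale
-- ===== SOURCE A (Python) =====
-- LOCALE_SYNONYMS = {
--     'en': [['en_US', 'en-US', 'en_US.UTF8', 'en_US.UTF-8',
--             'English_United States.1252', 'en-us', 'en_us',
--             'en_US.utf8'],
--            ['en_GB', 'en-GB', 'en_GB.UTF8', 'en_GB.UTF-8',
--             'English_United Kingdom.1252', 'en-gb', 'en_gb',
--             'en_GB.utf8']],
--     'es': ['es_ES', 'es-ES', 'es_ES.UTF8', 'es_ES.UTF-8',
--            'Spanish_Spain.1252', 'es-es', 'es_es',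
--            'es_ES.utf8'],
--     'sp': ['es_ES', 'es-ES', 'es_ES.UTF8', 'es_ES.UTF-8',
--            'Spanish_Spain.1252', 'es-es', 'es_es',
--            'es_ES.utf8'],
--     'fr': [['fr_FR', 'fr-FR', 'fr_BE', 'fr_CH', 'fr-BE',
--             'fr-CH', 'fr_FR.UTF8', 'fr_CH.UTF8',
--             'fr_BE.UTF8', 'fr_FR.UTF-8', 'fr_CH.UTF-8',
--             'fr_BE.UTF-8', 'French_France.1252', 'fr-fr',
--             'fr_fr', 'fr-be', 'fr_be', 'fr-ch', 'fr_ch',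
--             'fr_FR.utf8', 'fr_BE.utf8', 'fr_CH.utf8'],
--            ['fr_CA', 'fr-CA', 'fr_CA.UTF8', 'fr_CA.UTF-8',
--             'French_Canada.1252', 'fr-ca', 'fr_ca',
--             'fr_CA.utf8']],
--     'de': ['de_DE', 'de-DE', 'de_DE.UTF8', 'de_DE.UTF-8',
--            'German_Germany.1252', 'de-de', 'de_de',
--            'de_DE.utf8'],
--     'ge': ['de_DE', 'de-DE', 'de_DE.UTF8', 'de_DE.UTF-8',
--            'German_Germany.1252', 'de-de', 'de_de',
--            'de_DE.utf8'],
--     'it': ['it_IT', 'it-IT', 'it_IT.UTF8', 'it_IT.UTF-8',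
--            'Italian_Italy.1252', 'it-it', 'it_it',
--            'it_IT.utf8'],
--     'ca': ['ca_ES', 'ca-ES', 'ca_ES.UTF8', 'ca_ES.UTF-8',
--            'Catalan_Spain.1252', 'ca-es', 'ca_es',
--            'ca_ES.utf8']}
--
-- def bigml_locale(locale_alias):
--     """Returns the locale used in bigml.com for the given locale_alias
--
--        The result is the locale code used in bigml.com provided that
--        the locale user code has been correctly mapped. None otherwise.
--     """
--     language_code = locale_alias.lower()[0:2]
--     if language_code not in LOCALE_SYNONYMS:
--         return None
--     alternatives = LOCALE_SYNONYMS[language_code]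
--     if isinstance(alternatives[0], str):
--         return (alternatives[0] if locale_alias in alternatives
--                 else None)
--     result = None
--     for subgroup in alternatives:
--         if locale_alias in subgroup:
--             result = subgroup[0]
--             break
--     return result
-- ===== SOURCE B (Python) =====
-- # The alias table is systematic: every group is a base code plus its mechanical
-- # variants (dash form, UTF8/UTF-8/utf8 suffixes, lowercase forms) and one Windows
-- # name.  B generates the flat alias->canonical index from that compact spec once
-- # at module load; the function itself is a single dict lookup.
-- SPECS = [
--     ('en_US', ['en_US'], 'English_United States.1252'),
--     ('en_GB', ['en_GB'], 'English_United Kingdom.1252'),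
--     ('es_ES', ['es_ES'], 'Spanish_Spain.1252'),
--     ('fr_FR', ['fr_FR', 'fr_BE', 'fr_CH'], 'French_France.1252'),
--     ('fr_CA', ['fr_CA'], 'French_Canada.1252'),
--     ('de_DE', ['de_DE'], 'German_Germany.1252'),
--     ('it_IT', ['it_IT'], 'Italian_Italy.1252'),
--     ('ca_ES', ['ca_ES'], 'Catalan_Spain.1252'),
-- ]
--
-- _FLAT = {}
-- for _canon, _bases, _win in SPECS:
--     for _b in _bases:
--         _dash = _b.replace('_', '-')
--         for _alias in (_b, _dash, _b + '.UTF8', _b + '.UTF-8',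
--                        _dash.lower(), _b.lower(), _b + '.utf8'):
--             _FLAT[_alias] = _canon
--     _FLAT[_win] = _canon
--
--
-- def bigml_locale(locale_alias):
--     """Returns the locale used in bigml.com for the given locale_alias
--
--        The result is the locale code used in bigml.com provided that
--        the locale user code has been correctly mapped. None otherwise.
--     """
--     return _FLAT.get(locale_alias)
-- ===== Notes on version B (the rewrite author's own statement) =====
-- stated objective: simpler
-- what changed: Replaces the 2-char-prefix gate, the isinstance test and the per-group scan over a hand-written nested table with a flat alias->canonical dict generated once at module load from a compact spec (base codes, mechanical dash/UTF8/lowercase variants, Windows name); the function body becomes a single dict lookup.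
import Mathlib
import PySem

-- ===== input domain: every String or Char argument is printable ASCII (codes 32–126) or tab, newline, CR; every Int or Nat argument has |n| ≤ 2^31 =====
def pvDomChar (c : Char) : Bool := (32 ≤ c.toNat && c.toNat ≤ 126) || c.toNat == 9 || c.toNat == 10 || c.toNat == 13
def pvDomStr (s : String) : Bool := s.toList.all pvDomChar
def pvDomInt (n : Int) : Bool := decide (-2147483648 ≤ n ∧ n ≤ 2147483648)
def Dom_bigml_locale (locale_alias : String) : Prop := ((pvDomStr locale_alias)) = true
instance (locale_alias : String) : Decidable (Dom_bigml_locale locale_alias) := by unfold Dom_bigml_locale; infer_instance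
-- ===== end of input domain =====

-- B drops A's prefix gate, isinstance test and group scan: the alias table is
-- regenerated at module load from a compact spec (base codes + mechanical
-- variants + one Windows name) into a flat alias->canonical dict, and the
-- function becomes one dict lookup (objective: simpler).

-- ===== PORT A =====
-- The Python dict's values are heterogeneous (list of str, or list of list of str);
-- SynVal is that disjoint union, and matching its constructor is A's isinstance test.
inductive SynVal
  | flat : List String → SynVal
  | grouped : List (List String) → SynVal
deriving Repr, DecidableEq

def LOCALE_SYNONYMS : PySem.Dict String SynVal :=
  PySem.Dict.ofList [
    ("en", SynVal.grouped [["en_US", "en-US", "en_US.UTF8", "en_US.UTF-8", "English_United States.1252", "en-us", "en_us", "en_US.utf8"], ["en_GB", "en-GB", "en_GB.UTF8", "en_GB.UTF-8", "English_United Kingdom.1252", "en-gb", "en_gb", "en_GB.utf8"]]),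
    ("es", SynVal.flat ["es_ES", "es-ES", "es_ES.UTF8", "es_ES.UTF-8", "Spanish_Spain.1252", "es-es", "es_es", "es_ES.utf8"]),
    ("sp", SynVal.flat ["es_ES", "es-ES", "es_ES.UTF8", "es_ES.UTF-8", "Spanish_Spain.1252", "es-es", "es_es", "es_ES.utf8"]),
    ("fr", SynVal.grouped [["fr_FR", "fr-FR", "fr_BE", "fr_CH", "fr-BE", "fr-CH", "fr_FR.UTF8", "fr_CH.UTF8", "fr_BE.UTF8", "fr_FR.UTF-8", "fr_CH.UTF-8", "fr_BE.UTF-8", "French_France.1252", "fr-fr", "fr_fr", "fr-be", "fr_be", "fr-ch", "fr_ch", "fr_FR.utf8", "fr_BE.utf8", "fr_CH.utf8"], ["fr_CA", "fr-CA", "fr_CA.UTF8", "fr_CA.UTF-8", "French_Canada.1252", "fr-ca", "fr_ca", "fr_CA.utf8"]]),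
    ("de", SynVal.flat ["de_DE", "de-DE", "de_DE.UTF8", "de_DE.UTF-8", "German_Germany.1252", "de-de", "de_de", "de_DE.utf8"]),
    ("ge", SynVal.flat ["de_DE", "de-DE", "de_DE.UTF8", "de_DE.UTF-8", "German_Germany.1252", "de-de", "de_de", "de_DE.utf8"]),
    ("it", SynVal.flat ["it_IT", "it-IT", "it_IT.UTF8", "it_IT.UTF-8", "Italian_Italy.1252", "it-it", "it_it", "it_IT.utf8"]),
    ("ca", SynVal.flat ["ca_ES", "ca-ES", "ca_ES.UTF8", "ca_ES.UTF-8", "Catalan_Spain.1252", "ca-es", "ca_es", "ca_ES.utf8"])]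

-- 'for subgroup in alternatives: if locale_alias in subgroup: result = subgroup[0]; break'
-- (head? is exact: the branch is taken only when the subgroup is nonempty)
def bigml_locale_loop : List (List String) → String → Option String
  | [], _ => none
  | subgroup :: rest, a => if a ∈ subgroup then subgroup.head? else bigml_locale_loop rest a

def bigml_locale (locale_alias : String) : Option String :=
  -- language_code = locale_alias.lower()[0:2], inlined into the dict lookup
  match PySem.Dict.get? LOCALE_SYNONYMS (PySem.Str.slice (PySem.Str.lower locale_alias) (some 0) (some 2)) with
  | none => none
  | some (SynVal.flat alternatives) =>
      -- 'alternatives[0] if locale_alias in alternatives else None' (head? exact: taken branch ⇒ nonempty)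
      if locale_alias ∈ alternatives then alternatives.head? else none
  | some (SynVal.grouped alternatives) => bigml_locale_loop alternatives locale_alias

-- ===== PORT B =====
-- SPECS: (canonical code, base codes of the group, Windows name)
def pvSPECS : List (String × List String × String) := [
  ("en_US", (["en_US"], "English_United States.1252")),
  ("en_GB", (["en_GB"], "English_United Kingdom.1252")),
  ("es_ES", (["es_ES"], "Spanish_Spain.1252")),
  ("fr_FR", (["fr_FR", "fr_BE", "fr_CH"], "French_France.1252")),
  ("fr_CA", (["fr_CA"], "French_Canada.1252")),
  ("de_DE", (["de_DE"], "German_Germany.1252")),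
  ("it_IT", (["it_IT"], "Italian_Italy.1252")),
  ("ca_ES", (["ca_ES"], "Catalan_Spain.1252"))]

-- the tuple '(b, dash, b+'.UTF8', b+'.UTF-8', dash.lower(), b.lower(), b+'.utf8')'
-- (string '+' ported as PySem.Str.join "" [·, ·], exact for concatenation)
def pvVariants (b : String) : List String :=
  let dash := PySem.Str.replace b "_" "-"
  [b, dash, PySem.Str.join "" [b, ".UTF8"], PySem.Str.join "" [b, ".UTF-8"],
   PySem.Str.lower dash, PySem.Str.lower b, PySem.Str.join "" [b, ".utf8"]]

-- the module-load loop building _FLAT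
def pvFLAT : PySem.Dict String String :=
  pvSPECS.foldl
    (fun d spec =>
      (spec.2.1.foldl
        (fun d b => (pvVariants b).foldl (fun d al => d.insert al spec.1) d) d).insert spec.2.2 spec.1)
    PySem.Dict.empty

def bigml_locale_alt (locale_alias : String) : Option String :=
  PySem.Dict.get? pvFLAT locale_alias

-- ===== PRECONDITION & SPEC =====
def Spec_bigml_locale (locale_alias : String) (out : Option String) : Prop := out = bigml_locale_alt locale_alias
instance (locale_alias : String) (out : Option String) : Decidable (Spec_bigml_locale locale_alias out) := by unfold Spec_bigml_locale; infer_instance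

-- ===== CLAIM (what is proved, stated in full; the proofs are below) =====
def Claim_equal_bigml_locale : Prop := ∀ (locale_alias : String), Dom_bigml_locale locale_alias → Spec_bigml_locale locale_alias (bigml_locale locale_alias)

-- ===== LEMMAS AND PROOFS =====

-- every alias string occurring anywhere in LOCALE_SYNONYMS
def pvALL : List String := ["en_US", "en-US", "en_US.UTF8", "en_US.UTF-8", "English_United States.1252", "en-us", "en_us", "en_US.utf8", "en_GB", "en-GB", "en_GB.UTF8", "en_GB.UTF-8", "English_United Kingdom.1252", "en-gb", "en_gb", "en_GB.utf8", "es_ES", "es-ES", "es_ES.UTF8", "es_ES.UTF-8", "Spanish_Spain.1252", "es-es", "es_es", "es_ES.utf8", "fr_FR", "fr-FR", "fr_BE", "fr_CH", "fr-BE", "fr-CH", "fr_FR.UTF8", "fr_CH.UTF8", "fr_BE.UTF8", "fr_FR.UTF-8", "fr_CH.UTF-8", "fr_BE.UTF-8", "French_France.1252", "fr-fr", "fr_fr", "fr-be", "fr_be", "fr-ch", "fr_ch", "fr_FR.utf8", "fr_BE.utf8", "fr_CH.utf8", "fr_CA", "fr-CA", "fr_CA.UTF8", "fr_CA.UTF-8",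 "French_Canada.1252", "fr-ca", "fr_ca", "fr_CA.utf8", "de_DE", "de-DE", "de_DE.UTF8", "de_DE.UTF-8", "German_Germany.1252", "de-de", "de_de", "de_DE.utf8", "it_IT", "it-IT", "it_IT.UTF8", "it_IT.UTF-8", "Italian_Italy.1252", "it-it", "it_it", "it_IT.utf8", "ca_ES", "ca-ES", "ca_ES.UTF8", "ca_ES.UTF-8", "Catalan_Spain.1252", "ca-es", "ca_es", "ca_ES.utf8"]

set_option maxRecDepth 100000 in
theorem pvB_none_of_not_mem (s : String) (hs : s ∉ pvALL) : bigml_locale_alt s = none := by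
  have hsub : pvFLAT.keys ⊆ pvALL := by decide
  unfold bigml_locale_alt
  rw [PySem.Dict.get?_eq_none_iff_not_mem_keys]
  exact fun hk => hs (hsub hk)

set_option maxRecDepth 100000 in
set_option maxHeartbeats 1000000 in
theorem pvA_none_of_not_mem (s : String) (hs : s ∉ pvALL) : bigml_locale s = none := by
  unfold bigml_locale
  cases hp : PySem.Dict.get? LOCALE_SYNONYMS (PySem.Str.slice (PySem.Str.lower s) (some 0) (some 2)) with
  | none => rfl
  | some v =>
    have hitems := PySem.Dict.mem_items_of_get?_eq_some _ hp
    have : LOCALE_SYNONYMS.items =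
      [("en", SynVal.grouped [["en_US", "en-US", "en_US.UTF8", "en_US.UTF-8", "English_United States.1252", "en-us", "en_us", "en_US.utf8"], ["en_GB", "en-GB", "en_GB.UTF8", "en_GB.UTF-8", "English_United Kingdom.1252", "en-gb", "en_gb", "en_GB.utf8"]]),
       ("es", SynVal.flat ["es_ES", "es-ES", "es_ES.UTF8", "es_ES.UTF-8", "Spanish_Spain.1252", "es-es", "es_es", "es_ES.utf8"]),
       ("sp", SynVal.flat ["es_ES", "es-ES", "es_ES.UTF8", "es_ES.UTF-8", "Spanish_Spain.1252", "es-es", "es_es", "es_ES.utf8"]),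
       ("fr", SynVal.grouped [["fr_FR", "fr-FR", "fr_BE", "fr_CH", "fr-BE", "fr-CH", "fr_FR.UTF8", "fr_CH.UTF8", "fr_BE.UTF8", "fr_FR.UTF-8", "fr_CH.UTF-8", "fr_BE.UTF-8", "French_France.1252", "fr-fr", "fr_fr", "fr-be", "fr_be", "fr-ch", "fr_ch", "fr_FR.utf8", "fr_BE.utf8", "fr_CH.utf8"], ["fr_CA", "fr-CA", "fr_CA.UTF8", "fr_CA.UTF-8", "French_Canada.1252", "fr-ca", "fr_ca", "fr_CA.utf8"]]),
       ("de", SynVal.flat ["de_DE", "de-DE", "de_DE.UTF8", "de_DE.UTF-8", "German_Germany.1252", "de-de", "de_de", "de_DE.utf8"]),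
       ("ge", SynVal.flat ["de_DE", "de-DE", "de_DE.UTF8", "de_DE.UTF-8", "German_Germany.1252", "de-de", "de_de", "de_DE.utf8"]),
       ("it", SynVal.flat ["it_IT", "it-IT", "it_IT.UTF8", "it_IT.UTF-8", "Italian_Italy.1252", "it-it", "it_it", "it_IT.utf8"]),
       ("ca", SynVal.flat ["ca_ES", "ca-ES", "ca_ES.UTF8", "ca_ES.UTF-8", "Catalan_Spain.1252", "ca-es", "ca_es", "ca_ES.utf8"])] := rfl
    rw [this] at hitems
    simp only [List.mem_cons, List.not_mem_nil, or_false, Prod.mk.injEq] at hitems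
    have hnot : ∀ g : List String, g ⊆ pvALL → s ∉ g := fun g hg hm => hs (hg hm)
    rcases hitems with ⟨_, rfl⟩ | ⟨_, rfl⟩ | ⟨_, rfl⟩ | ⟨_, rfl⟩ | ⟨_, rfl⟩ | ⟨_, rfl⟩ | ⟨_, rfl⟩ | ⟨_, rfl⟩ <;>
      simp only [bigml_locale_loop] <;>
      rw [if_neg (hnot _ (by decide))] <;>
      first
        | rfl
        | (rw [if_neg (hnot _ (by decide))])

-- ===== VERDICT (by name: the statement is the Claim_ definition above) =====
set_option maxRecDepth 100000 in
set_option maxHeartbeats 4000000 in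
theorem bigml_locale_spec : Claim_equal_bigml_locale := by
  intro s _
  unfold Spec_bigml_locale
  by_cases h : s ∈ pvALL
  · fin_cases h <;> decide
  · rw [pvA_none_of_not_mem s h, pvB_none_of_not_mem s h]
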